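-- pv_equiv track=rewrite | github.com/fractalego/bert_ner | bert_ner/aux.py | get_sentences_and_targets_from_sentence_tuples
-- ===== SOURCE A (Python) =====
-- def add_bioes(tags):
--     bioes_tags = []
--
--     for i in range(len(tags)):
--         curr = tags[i]
--         if curr in ['OTHER', '[CLS]']:
--             bioes_tags.append(curr)
--             continue
--
--         prior = tags[i - 1] if i - 1 >= 0 else 'OTHER'
--         nxt = tags[i + 1] if i + 1 < len(tags) else 'OTHER'
--
--         if prior != curr and nxt != curr:
--             bioes_tags.append('S-' + curr)
--         if prior == curr and nxt == curr:
--             bioes_tags.append('I-' + curr)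
--         if prior != curr and nxt == curr:
--             bioes_tags.append('B-' + curr)
--         if prior == curr and nxt != curr:
--             bioes_tags.append('E-' + curr)
--
--     return bioes_tags
--
-- def get_sentences_and_targets_from_sentence_tuples(tuples_list):
--     all_sentences = []
--     all_targets = []
--     for tuple in tuples_list:
--         sentence = ''
--         for item in tuple:
--             sentence += item[0] + ' '
--         all_sentences.append(sentence[:-1])
--         all_targets.append(add_bioes([item[2] for item in tuple]))
--     return all_sentences, all_targets
-- ===== SOURCE B (Python) =====
-- def add_bioes(tags):
--     bioes_tags = []
--     i = 0
--     n = len(tags)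
--     while i < n:
--         t = tags[i]
--         if t in ('OTHER', '[CLS]'):
--             bioes_tags.append(t)
--             i += 1
--             continue
--         j = i + 1
--         while j < n and tags[j] == t:
--             j += 1
--         if j - i == 1:
--             bioes_tags.append('S-' + t)
--         else:
--             bioes_tags.append('B-' + t)
--             bioes_tags += ['I-' + t] * (j - i - 2)
--             bioes_tags.append('E-' + t)
--         i = j
--     return bioes_tags
--
--
-- def get_sentences_and_targets_from_sentence_tuples(tuples_list):
--     all_sentences = [' '.join(item[0] for item in tup) for tup in tuples_list]
--     all_targets = [add_bioes([item[2] for item in tup]) for tup in tuples_list]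
--     return all_sentences, all_targets
-- ===== Notes on version B (the rewrite author's own statement) =====
-- stated objective: simpler
-- what changed: add_bioes now scans the tag list once grouping maximal runs of equal consecutive tags and emits S- or B-/I-*/E- per run, instead of re-inspecting both neighbours at every index; sentences are built with ' '.join instead of concatenate-plus-trailing-space-then-slice.
import Mathlib
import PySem

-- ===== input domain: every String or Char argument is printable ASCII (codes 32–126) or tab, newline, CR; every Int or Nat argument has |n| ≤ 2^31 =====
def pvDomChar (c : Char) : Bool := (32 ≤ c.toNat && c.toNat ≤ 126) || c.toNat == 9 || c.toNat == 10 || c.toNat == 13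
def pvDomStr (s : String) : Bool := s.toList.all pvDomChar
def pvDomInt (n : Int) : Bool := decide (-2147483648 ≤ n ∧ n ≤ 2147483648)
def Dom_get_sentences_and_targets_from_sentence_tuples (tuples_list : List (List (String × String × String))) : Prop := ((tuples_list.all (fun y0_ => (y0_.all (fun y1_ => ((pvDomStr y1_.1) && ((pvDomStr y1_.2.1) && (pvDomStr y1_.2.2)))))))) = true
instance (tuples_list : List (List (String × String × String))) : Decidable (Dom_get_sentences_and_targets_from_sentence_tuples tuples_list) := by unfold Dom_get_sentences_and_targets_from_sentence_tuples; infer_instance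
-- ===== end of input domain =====

-- B rewrites add_bioes to a single scan grouping maximal runs of equal consecutive tags
-- (emitting S- or B-/I-*/E- per run) instead of per-index neighbour inspection, and builds
-- sentences with ' '.join; the return value is proved equal on all inputs.

-- ===== PORT A =====
-- loop body of A's add_bioes (the four conditional appends, in A's order)
def bodyA (tags : List String) (bioes_tags : List String) (i : Int) : List String :=
  -- every index handed to pyGet? below is in range in Python; .getD "" is never the none case
  let curr := (PySem.List.pyGet? tags i).getD ""
  if curr = "OTHER" ∨ curr = "[CLS]" then bioes_tags ++ [curr]
  else
    let prior := if i - 1 ≥ 0 then (PySem.List.pyGet? tags (i - 1)).getD "" else "OTHER"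
    let nxt := if i + 1 < (tags.length : Int) then (PySem.List.pyGet? tags (i + 1)).getD "" else "OTHER"
    let b1 := if prior ≠ curr ∧ nxt ≠ curr then bioes_tags ++ ["S-" ++ curr] else bioes_tags
    let b2 := if prior = curr ∧ nxt = curr then b1 ++ ["I-" ++ curr] else b1
    let b3 := if prior ≠ curr ∧ nxt = curr then b2 ++ ["B-" ++ curr] else b2
    if prior = curr ∧ nxt ≠ curr then b3 ++ ["E-" ++ curr] else b3

def add_bioes (tags : List String) : List String :=
  (PySem.List.pyRange 0 (tags.length : Int) 1).foldl (bodyA tags) []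

def get_sentences_and_targets_from_sentence_tuples (tuples_list : List (List (String × String × String))) : List String × List (List String) :=
  tuples_list.foldl (fun (acc : List String × List (List String)) tup =>
    let sentence := tup.foldl (fun s item => s ++ item.1 ++ " ") ""
    (acc.1 ++ [PySem.Str.slice sentence none (some (-1))],
     acc.2 ++ [add_bioes (tup.map (fun item => item.2.2))])) ([], [])

-- ===== PORT B =====
def add_bioes_runs (tags : List String) : List String :=
  match tags with
  | [] => []
  | t :: rest =>
    if t = "OTHER" ∨ t = "[CLS]" then t :: add_bioes_runs rest
    else
      let run := rest.takeWhile (fun x => x = t)     -- the inner while: extend the run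
      let rest2 := rest.dropWhile (fun x => x = t)
      if run.length = 0 then ("S-" ++ t) :: add_bioes_runs rest2
      else ("B-" ++ t) :: (List.replicate (run.length - 1) ("I-" ++ t) ++ (("E-" ++ t) :: add_bioes_runs rest2))
  termination_by tags.length
  decreasing_by
    all_goals first
      | exact Nat.lt_succ_of_le (List.length_dropWhile_le _ rest)
      | simp

def get_sentences_and_targets_from_sentence_tuples_alt (tuples_list : List (List (String × String × String))) : List String × List (List String) :=
  (tuples_list.map (fun tup => PySem.Str.join " " (tup.map (fun item => item.1))),
   tuples_list.map (fun tup => add_bioes_runs (tup.map (fun item => item.2.2))))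

-- ===== PRECONDITION & SPEC =====
def Spec_get_sentences_and_targets_from_sentence_tuples (tuples_list : List (List (String × String × String))) (out : List String × List (List String)) : Prop := out = get_sentences_and_targets_from_sentence_tuples_alt tuples_list
instance (tuples_list : List (List (String × String × String))) (out : List String × List (List String)) : Decidable (Spec_get_sentences_and_targets_from_sentence_tuples tuples_list out) := by unfold Spec_get_sentences_and_targets_from_sentence_tuples; infer_instance

-- ===== CLAIM (what is proved, stated in full; the proofs are below) =====
def Claim_equal_get_sentences_and_targets_from_sentence_tuples : Prop := ∀ (tuples_list : List (List (String × String × String))), Dom_get_sentences_and_targets_from_sentence_tuples tuples_list → Spec_get_sentences_and_targets_from_sentence_tuples tuples_list (get_sentences_and_targets_from_sentence_tuples tuples_list)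

-- ===== LEMMAS AND PROOFS =====

-- what A's loop body appends at one position, as a list
def emitA (p c x : String) : List String :=
  if c = "OTHER" ∨ c = "[CLS]" then [c]
  else (if p ≠ c ∧ x ≠ c then ["S-" ++ c] else []) ++
       (if p = c ∧ x = c then ["I-" ++ c] else []) ++
       (if p ≠ c ∧ x = c then ["B-" ++ c] else []) ++
       (if p = c ∧ x ≠ c then ["E-" ++ c] else [])

-- A's add_bioes as a left-to-right recursion carrying the previous tag
def goA : String → List String → List String
  | _, [] => []
  | p, c :: rest => emitA p c (rest.headD "OTHER") ++ goA c rest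

lemma curr_at (pre suf : List String) (c : String) :
    PySem.List.pyGet? (pre ++ c :: suf) (pre.length : Int) = some c := by
  rw [PySem.List.pyGet?_natCast]
  simp


lemma prior_at (pre suf : List String) (c : String) (h : pre ≠ []) :
    PySem.List.pyGet? (pre ++ c :: suf) ((pre.length : Int) - 1) = pre.getLast? := by
  have hl : 0 < pre.length := List.length_pos_of_ne_nil h
  have : (pre.length : Int) - 1 = ((pre.length - 1 : Nat) : Int) := by omega
  rw [this, PySem.List.pyGet?_natCast]
  rw [List.getElem?_append_left (by omega)]
  rw [List.getLast?_eq_getElem?]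


lemma nxt_at (pre suf : List String) (c : String) :
    PySem.List.pyGet? (pre ++ c :: suf) ((pre.length : Int) + 1) = suf.head? := by
  have : (pre.length : Int) + 1 = ((pre.length + 1 : Nat) : Int) := by omega
  rw [this, PySem.List.pyGet?_natCast]
  rw [List.getElem?_append_right (by omega)]
  simp
  cases suf <;> simp


lemma bodyA_eq_emit (pre suf : List String) (c : String) (acc : List String) :
    bodyA (pre ++ c :: suf) acc (pre.length : Int) =
      acc ++ emitA (pre.getLast?.getD "OTHER") c (suf.headD "OTHER") := by
  unfold bodyA emitA
  rw [curr_at]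
  simp only [Option.getD_some]
  by_cases hs : c = "OTHER" ∨ c = "[CLS]"
  · simp [hs]
  · simp only [hs, if_false]
    have hprior : (if (pre.length : Int) - 1 ≥ 0 then (PySem.List.pyGet? (pre ++ c :: suf) ((pre.length : Int) - 1)).getD "" else "OTHER") = pre.getLast?.getD "OTHER" := by
      cases pre with
      | nil => simp
      | cons p ps =>
        rw [if_pos (by simp), prior_at _ _ _ (by simp)]
        cases hL : (p :: ps).getLast? with
        | none => simp at hL
        | some v => simp
    have hnxt : (if (pre.length : Int) + 1 < ((pre ++ c :: suf).length : Int) then (PySem.List.pyGet? (pre ++ c :: suf) ((pre.length : Int) + 1)).getD "" else "OTHER") = suf.headD "OTHER" := by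
      cases suf with
      | nil => rw [if_neg (by simp)]; simp
      | cons x xs =>
        rw [if_pos (by simp), nxt_at]
        simp
    rw [hprior, hnxt]
    split_ifs <;> simp_all <;> omega

lemma foldl_bodyA (suf : List String) : ∀ (pre acc : List String),
    (PySem.List.pyRange (pre.length : Int) ((pre ++ suf).length : Int) 1).foldl (bodyA (pre ++ suf)) acc =
      acc ++ goA (pre.getLast?.getD "OTHER") suf := by
  induction suf with
  | nil => intro pre acc; simp [goA, pysem]
  | cons c suf2 ih =>
    intro pre acc
    rw [PySem.List.pyRange_one_cons (by simp)]
    rw [List.foldl_cons, bodyA_eq_emit]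
    have h1 : (pre.length : Int) + 1 = (((pre ++ [c]).length : Nat) : Int) := by simp
    have h2 : pre ++ c :: suf2 = (pre ++ [c]) ++ suf2 := by simp
    rw [h1, h2, ih (pre ++ [c])]
    simp [goA]

lemma goA_eq_runs (n : Nat) : ∀ (ts : List String), ts.length ≤ n →
    (∀ p, (∀ t rest, ts = t :: rest → (t = "OTHER" ∨ t = "[CLS]" ∨ p ≠ t)) →
       goA p ts = add_bioes_runs ts) ∧
    (∀ t rest, ts = t :: rest → ¬ (t = "OTHER" ∨ t = "[CLS]") →
       goA t ts = List.replicate (rest.takeWhile (fun x => x = t)).length ("I-" ++ t) ++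
                  (("E-" ++ t) :: add_bioes_runs (rest.dropWhile (fun x => x = t)))) := by
  induction n with
  | zero =>
    intro ts h
    have : ts = [] := by cases ts <;> simp_all
    subst this
    constructor
    · intro p _; simp [goA, add_bioes_runs]
    · intro t rest h _; simp at h
  | succ n ih =>
    intro ts hlen
    cases ts with
    | nil =>
      constructor
      · intro p _; simp [goA, add_bioes_runs]
      · intro t rest h _; simp at h
    | cons t rest =>
      have hrest : rest.length ≤ n := by simp at hlen; omega
      constructor
      · -- M part
        intro p hp
        by_cases hs : t = "OTHER" ∨ t = "[CLS]"
        · have hgo : goA t rest = add_bioes_runs rest := by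
            apply (ih rest hrest).1
            intro t' rest' hr
            by_cases hs' : t' = "OTHER" ∨ t' = "[CLS]"
            · tauto
            · right; right
              intro he; rw [he] at hs; exact hs' hs
          rw [goA, hgo]
          conv_rhs => rw [add_bioes_runs]
          rw [if_pos hs]
          simp [emitA, hs]
        · have hp' : p ≠ t := by
            rcases hp t rest rfl with h | h | h <;> tauto
          push_neg at hs
          obtain ⟨ht1, ht2⟩ := hs
          cases rest with
          | nil =>
            rw [goA, goA]
            conv_rhs => rw [add_bioes_runs]
            simp [emitA, hp', ht1, ht2, Ne.symm ht1, add_bioes_runs]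
          | cons c rest2 =>
            by_cases hc : c = t
            · subst hc
              have hR := (ih (c :: rest2) hrest).2 c rest2 rfl (by tauto)
              rw [goA, hR]
              conv_rhs => rw [add_bioes_runs]
              rw [if_neg (by tauto)]
              simp only [List.takeWhile_cons, decide_eq_true_eq, if_pos rfl]
              simp [emitA, hp', ht1, ht2, List.dropWhile_cons]
            · have hM : goA t (c :: rest2) = add_bioes_runs (c :: rest2) := by
                apply (ih (c :: rest2) hrest).1
                intro t' rest' hr
                injection hr with h1 h2
                subst h1
                right; right; exact fun he => hc he.symm
              rw [goA, hM]
              conv_rhs => rw [add_bioes_runs]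
              rw [if_neg (by tauto)]
              simp only [List.takeWhile_cons, decide_eq_true_eq, if_neg hc, List.dropWhile_cons]
              simp [emitA, hp', ht1, ht2, hc, Ne.symm hc]
      · -- R part
        intro t' rest' hts hs
        obtain ⟨h1, h2⟩ := List.cons.inj hts
        rw [← h1] at hs ⊢
        rw [← h2]
        push_neg at hs
        obtain ⟨ht1, ht2⟩ := hs
        cases rest with
        | nil =>
          rw [goA, goA]
          simp [emitA, ht1, ht2, Ne.symm ht1, add_bioes_runs]
        | cons c rest2 =>
          by_cases hc : c = t
          · subst hc
            have hR := (ih (c :: rest2) hrest).2 c rest2 rfl (by tauto)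
            rw [goA, hR]
            simp only [List.takeWhile_cons, decide_eq_true_eq, if_pos rfl, List.dropWhile_cons]
            simp [emitA, ht1, ht2, List.replicate_succ]
          · have hM : goA t (c :: rest2) = add_bioes_runs (c :: rest2) := by
              apply (ih (c :: rest2) hrest).1
              intro t'' rest'' hr
              injection hr with h1 h2
              subst h1
              right; right; exact fun he => hc he.symm
            rw [goA, hM]
            simp only [List.takeWhile_cons, decide_eq_true_eq, if_neg hc, List.dropWhile_cons]
            simp [emitA, ht1, ht2, hc]

lemma add_bioes_eq_goA (tags : List String) : add_bioes tags = goA "OTHER" tags := by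
  unfold add_bioes
  have h := foldl_bodyA tags [] []
  simpa using h

lemma add_bioes_eq (tags : List String) : add_bioes tags = add_bioes_runs tags := by
  rw [add_bioes_eq_goA]
  apply (goA_eq_runs tags.length tags le_rfl).1
  intro t rest _
  by_cases hs : t = "OTHER" ∨ t = "[CLS]"
  · tauto
  · right; right
    intro he; rw [← he] at hs; tauto

lemma foldl_sent (ws : List String) : ∀ s0 : String, (ws.foldl (fun s w => s ++ w ++ " ") s0).toList = s0.toList ++ ws.flatMap (fun w => w.toList ++ [' ']) := by
  induction ws with
  | nil => simp [List.foldl]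
  | cons w ws ih => intro s0; simp [List.foldl, ih]

lemma dropLast_flatMap_eq_join (ws : List String) :
    (ws.flatMap (fun w => w.toList ++ [' '])).dropLast = PySem.Chars.join [' '] (ws.map String.toList) := by
  induction ws with
  | nil => simp [PySem.Chars.join_nil]
  | cons w ws ih =>
    cases ws with
    | nil => simp [PySem.Chars.join_singleton]
    | cons w2 ws2 =>
      rw [List.map_cons, List.map_cons, PySem.Chars.join_cons_cons, ← List.map_cons, ← ih]
      rw [List.flatMap_cons, List.dropLast_append_of_ne_nil (by simp [List.flatMap_cons])]

lemma sentence_eq (ws : List String) :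
    PySem.Str.slice (ws.foldl (fun s w => s ++ w ++ " ") "") none (some (-1)) =
      PySem.Str.join " " ws := by
  apply String.toList_inj.mp
  simp only [pysem]
  rw [foldl_sent]
  have h1 : ("" : String).toList = [] := rfl
  have h2 : (" " : String).toList = [' '] := rfl
  rw [h1, h2, List.nil_append, dropLast_flatMap_eq_join]

lemma outer_fold (tl : List (List (String × String × String))) : ∀ (a : List String) (b : List (List String)),
    tl.foldl (fun (acc : List String × List (List String)) tup =>
      (acc.1 ++ [PySem.Str.slice (tup.foldl (fun s item => s ++ item.1 ++ " ") "") none (some (-1))],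
       acc.2 ++ [add_bioes (tup.map (fun item => item.2.2))])) (a, b)
    = (a ++ tl.map (fun tup => PySem.Str.join " " (tup.map (fun item => item.1))),
       b ++ tl.map (fun tup => add_bioes_runs (tup.map (fun item => item.2.2)))) := by
  induction tl with
  | nil => intro a b; simp
  | cons tup tl ih =>
    intro a b
    rw [List.foldl_cons, ih]
    simp only [add_bioes_eq, List.append_assoc, List.cons_append]
    rw [show List.foldl (fun (s : String) (item : String × String × String) => s ++ item.1 ++ " ") "" tup
          = List.foldl (fun s w => s ++ w ++ " ") "" (tup.map (fun item => item.1)) from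
        by simp [List.foldl_map],
      sentence_eq]
    simp

-- ===== VERDICT (by name: the statement is the Claim_ definition above) =====
theorem get_sentences_and_targets_from_sentence_tuples_spec : Claim_equal_get_sentences_and_targets_from_sentence_tuples := by
  intro tl _
  show _ = _
  unfold get_sentences_and_targets_from_sentence_tuples get_sentences_and_targets_from_sentence_tuples_alt
  simpa using outer_fold tl [] []
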